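-- pv_equiv track=rewrite | github.com/scottynou/chesslearning | backend/app/image_import_service.py | _compress_row
-- ===== SOURCE A (Python) =====
-- def _compress_row(row: str) -> str:
--     result = ""
--     empty_count = 0
--     for char in row:
--         if char == ".":
--             empty_count += 1
--             continue
--         if empty_count:
--             result += str(empty_count)
--             empty_count = 0
--         result += char
--     if empty_count:
--         result += str(empty_count)
--     return result
-- ===== SOURCE B (Python) =====
-- def _compress_row(row: str) -> str:
--     # Recursive run-decomposition: peel off the maximal leading run and recurse
--     # on the remainder, instead of a single pass with an empty_count accumulator.
--     if not row:
--         return ""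
--     c = row[0]
--     k = 1
--     while k < len(row) and row[k] == c:
--         k += 1
--     head = str(k) if c == "." else row[:k]
--     return head + _compress_row(row[k:])
-- ===== Notes on version B (the rewrite author's own statement) =====
-- stated objective: alternative
-- what changed: Replaces the single pass with a cross-iteration empty_count accumulator and mid-loop flush branch by a recursive run decomposition: peel the maximal leading run, emit its count (dots) or the run itself, recurse on the rest.
import Mathlib
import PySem

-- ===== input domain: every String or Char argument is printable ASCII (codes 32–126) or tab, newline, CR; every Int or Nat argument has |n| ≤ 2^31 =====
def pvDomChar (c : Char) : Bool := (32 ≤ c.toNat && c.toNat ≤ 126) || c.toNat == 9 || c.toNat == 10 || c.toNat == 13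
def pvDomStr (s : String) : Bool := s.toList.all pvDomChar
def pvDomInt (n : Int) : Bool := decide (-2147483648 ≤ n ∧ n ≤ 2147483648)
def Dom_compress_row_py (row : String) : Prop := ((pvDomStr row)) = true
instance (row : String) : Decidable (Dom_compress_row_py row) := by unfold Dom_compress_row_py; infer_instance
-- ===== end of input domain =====

-- B replaces A's one-pass empty_count accumulator with a recursive maximal-run decomposition (alternative, same cost).


-- ===== PORT A =====
-- loop body of A: 'if char == ".": empty_count += 1; continue' then flush-and-append
def pvAStep (st : List Char × Int) (ch : Char) : List Char × Int :=
  if ch = '.' then (st.1, st.2 + 1)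
  else
    let r := if st.2 ≠ 0 then st.1 ++ PySem.Int.toChars st.2 else st.1
    (r ++ [ch], 0)

def compress_row_py (row : String) : String :=
  let st := row.toList.foldl pvAStep ([], 0)
  String.mk (if st.2 ≠ 0 then st.1 ++ PySem.Int.toChars st.2 else st.1)

-- ===== PORT B =====
-- inner while of B: k = 1; while k < len(row) and row[k] == c: k += 1  — counted as 1 + leading run of the tail
def pvLead (c : Char) : List Char → Nat
  | [] => 0
  | d :: ds => if d = c then pvLead c ds + 1 else 0

-- B's recursion: head run, then _compress_row(row[k:]); row[k:] = cs.drop (pvLead c cs)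
def pvB : List Char → List Char
  | [] => []
  | c :: cs =>
    let k := pvLead c cs + 1
    (if c = '.' then PySem.Int.toChars (k : Int) else (c :: cs).take k) ++ pvB (cs.drop (pvLead c cs))
termination_by l => l.length
decreasing_by simp

def compress_row_py_alt (row : String) : String := String.mk (pvB row.toList)

-- ===== PRECONDITION & SPEC =====
def Spec_compress_row_py (row : String) (out : String) : Prop := out = compress_row_py_alt row
instance (row : String) (out : String) : Decidable (Spec_compress_row_py row out) := by unfold Spec_compress_row_py; infer_instance

-- ===== CLAIM (what is proved, stated in full; the proofs are below) =====
def Claim_equal_compress_row_py : Prop := ∀ (row : String), Dom_compress_row_py row → Spec_compress_row_py row (compress_row_py row)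

-- ===== LEMMAS AND PROOFS =====

-- A's state while the current maximal run (char c, length n) is open:
-- dots are buffered in the counter, other chars were emitted immediately.
def pvStateOf (c : Char) (acc : List Char) (n : Nat) : List Char × Int :=
  if c = '.' then (acc, (n : Int)) else (acc ++ List.replicate n c, 0)

def pvEmit (c : Char) (n : Nat) : List Char :=
  if c = '.' then PySem.Int.toChars (n : Int) else List.replicate n c

def pvFinish (st : List Char × Int) : List Char :=
  if st.2 ≠ 0 then st.1 ++ PySem.Int.toChars st.2 else st.1

theorem pvLead_take (c : Char) (cs : List Char) :
    cs.take (pvLead c cs) = List.replicate (pvLead c cs) c := by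
  induction cs with
  | nil => simp [pvLead]
  | cons d ds ih =>
    by_cases h : d = c
    · simp [pvLead, h, List.replicate_succ, ih]
    · simp [pvLead, h]

theorem pvLead_drop_head (c : Char) (cs : List Char) {d : Char} {ds : List Char}
    (h : cs.drop (pvLead c cs) = d :: ds) : d ≠ c := by
  induction cs with
  | nil => simp [pvLead] at h
  | cons e es ih =>
    by_cases he : e = c
    · simp [pvLead, he] at h; exact ih h
    · simp [pvLead, he] at h; rw [← h.1]; exact he

theorem pvAStep_same (c : Char) (acc : List Char) (n : Nat) :
    pvAStep (pvStateOf c acc n) c = pvStateOf c acc (n + 1) := by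
  by_cases h : c = '.'
  · simp [pvAStep, pvStateOf, h]
  · simp [pvAStep, pvStateOf, h, List.replicate_succ' (n := n)]

theorem pvAStep_new (c d : Char) (acc : List Char) (n : Nat) (hn : 0 < n) (hd : d ≠ c) :
    pvAStep (pvStateOf c acc n) d = pvStateOf d (acc ++ pvEmit c n) 1 := by
  have hn0 : n ≠ 0 := Nat.pos_iff_ne_zero.mp hn
  by_cases hc : c = '.'
  · subst hc
    simp [pvAStep, pvStateOf, pvEmit, hd, hn0]
  · by_cases hdd : d = '.'
    · simp [pvAStep, pvStateOf, pvEmit, hc, hdd]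
    · simp [pvAStep, pvStateOf, pvEmit, hc, hdd]

theorem pvFoldl_run (c : Char) (m : Nat) : ∀ (acc : List Char) (n : Nat) (rest : List Char),
    (List.replicate m c ++ rest).foldl pvAStep (pvStateOf c acc n)
      = rest.foldl pvAStep (pvStateOf c acc (n + m)) := by
  induction m with
  | zero => intro acc n rest; simp
  | succ m ih =>
    intro acc n rest
    rw [List.replicate_succ]
    simp only [List.cons_append, List.foldl_cons, pvAStep_same]
    rw [show n + (m + 1) = (n + 1) + m from by omega]
    exact ih acc (n + 1) rest

theorem pvFinish_state (c : Char) (acc : List Char) (n : Nat) (hn : 0 < n) :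
    pvFinish (pvStateOf c acc n) = acc ++ pvEmit c n := by
  have hn0 : n ≠ 0 := Nat.pos_iff_ne_zero.mp hn
  by_cases hc : c = '.'
  · simp [pvFinish, pvStateOf, pvEmit, hc, hn0]
  · simp [pvFinish, pvStateOf, pvEmit, hc]

theorem pvMain (N : Nat) : ∀ (cs : List Char), cs.length ≤ N → ∀ (c : Char) (acc : List Char),
    pvFinish (cs.foldl pvAStep (pvStateOf c acc 1)) = acc ++ pvB (c :: cs) := by
  induction N with
  | zero =>
    intro cs hcs c acc
    have : cs = [] := List.eq_nil_of_length_eq_zero (Nat.le_zero.mp hcs)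
    subst this
    rw [pvB]
    simp [pvLead, pvFinish_state c acc 1 (by omega), pvEmit, pvB]
  | succ N ih =>
    intro cs hcs c acc
    have hsplit : cs = List.replicate (pvLead c cs) c ++ cs.drop (pvLead c cs) := by
      conv_lhs => rw [← List.take_append_drop (pvLead c cs) cs]
      rw [pvLead_take]
    have hlen : pvLead c cs ≤ cs.length := by
      have := congrArg List.length hsplit
      simp at this; omega
    rw [show cs.foldl pvAStep (pvStateOf c acc 1)
          = (List.replicate (pvLead c cs) c ++ cs.drop (pvLead c cs)).foldl pvAStep (pvStateOf c acc 1)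
        from by rw [← hsplit]]
    rw [pvFoldl_run]
    have hBc : pvB (c :: cs)
        = pvEmit c (pvLead c cs + 1) ++ pvB (cs.drop (pvLead c cs)) := by
      rw [pvB]
      congr 1
      by_cases hc : c = '.'
      · simp [pvEmit, hc]
      · simp only [pvEmit, hc, if_false]
        rw [show (c :: cs).take (pvLead c cs + 1) = c :: cs.take (pvLead c cs) from rfl,
            pvLead_take, ← List.replicate_succ]
    cases hdrop : cs.drop (pvLead c cs) with
    | nil =>
      simp only [List.foldl_nil]
      rw [pvFinish_state c acc (1 + pvLead c cs) (by omega), hBc, hdrop]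
      simp [pvB, Nat.add_comm]
    | cons d ds =>
      have hd : d ≠ c := pvLead_drop_head c cs hdrop
      simp only [List.foldl_cons]
      rw [pvAStep_new c d acc (1 + pvLead c cs) (by omega) hd]
      have hds : ds.length ≤ N := by
        have := congrArg List.length hdrop
        simp at this; omega
      rw [ih ds hds d (acc ++ pvEmit c (1 + pvLead c cs))]
      rw [hBc, hdrop, Nat.add_comm 1 (pvLead c cs)]
      simp

-- ===== VERDICT (by name: the statement is the Claim_ definition above) =====
theorem compress_row_py_spec : Claim_equal_compress_row_py := by
  intro row _
  unfold Spec_compress_row_py compress_row_py compress_row_py_alt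
  cases hl : row.toList with
  | nil => rw [pvB]; simp
  | cons c cs =>
    simp only
    have hstep : pvAStep ([], 0) c = pvStateOf c [] 1 := by
      by_cases hc : c = '.'
      · simp [pvAStep, pvStateOf, hc]
      · simp [pvAStep, pvStateOf, hc]
    have := pvMain cs.length cs (le_refl _) c []
    simp only [List.nil_append] at this
    rw [List.foldl_cons, hstep]
    show String.mk (pvFinish (cs.foldl pvAStep (pvStateOf c [] 1))) = _
    rw [this]
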